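-- pv_equiv track=rewrite | github.com/Peter-developer01/_ | modules.py | fred
-- ===== SOURCE A (Python) =====
-- def fred(string, bones):
--     freqd = {}
--     for i in string:
--         if i in freqd:
--             freqd[i] += 1
--         else:
--             freqd[i] = 5 if i == bones else 1
--
--     return max(freqd, key=freqd.get)
-- ===== SOURCE B (Python) =====
-- def fred(string, bones):
--     # Sorting-based counting: run-length encode sorted(string) to get each distinct
--     # character's score (run length, +4 if it is the bones character), take the best
--     # score, then return the earliest-occurring character achieving it.
--     runs = []
--     prev = None
--     cnt = 0
--     for c in sorted(string):
--         if c == prev: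
--             cnt += 1
--         else:
--             if prev is not None:
--                 runs.append((prev, cnt + (4 if prev == bones else 0)))
--             prev, cnt = c, 1
--     if prev is not None:
--         runs.append((prev, cnt + (4 if prev == bones else 0)))
--     best = max(score for _, score in runs)
--     return string[min(string.index(c) for c, score in runs if score == best)]
-- ===== Notes on version B (the rewrite author's own statement) =====
-- stated objective: alternative
-- what changed: B replaces A's dictionary-counting loop by a sorting-based algorithm: run-length encode sorted(string) to obtain each distinct character's weighted score, take the maximum score, and return the character at the minimum first-occurrence index among the achievers (an explicit tie-break instead of dict insertion order).
import Mathlib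
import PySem

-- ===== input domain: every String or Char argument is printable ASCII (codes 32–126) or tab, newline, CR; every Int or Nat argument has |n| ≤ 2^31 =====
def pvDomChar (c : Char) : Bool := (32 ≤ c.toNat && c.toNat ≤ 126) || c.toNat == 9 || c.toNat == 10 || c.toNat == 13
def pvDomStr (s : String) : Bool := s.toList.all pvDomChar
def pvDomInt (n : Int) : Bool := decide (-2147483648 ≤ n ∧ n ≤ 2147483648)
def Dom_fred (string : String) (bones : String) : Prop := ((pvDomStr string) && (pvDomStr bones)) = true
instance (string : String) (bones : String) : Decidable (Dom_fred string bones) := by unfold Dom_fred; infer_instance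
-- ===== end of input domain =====

-- B replaces A's dict-counting loop by sorting: run-length encode sorted(string) for the
-- weighted scores, then return the earliest-occurring character achieving the maximal score.

-- ===== PORT A =====
-- Python dict with single-char-string comparison i == bones ported as String.mk [i] = bones.
def fredStep (bones : String) (d : PySem.Dict Char Int) (i : Char) : PySem.Dict Char Int :=
  if d.contains i then d.modify i 0 (· + 1)
  else d.insert i (if String.mk [i] = bones then 5 else 1)

def fred (string : String) (bones : String) : String :=
  let freqd := string.toList.foldl (fredStep bones) PySem.Dict.empty
  -- max(freqd, key=freqd.get): every iterated key is present, so get is getD _ 0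
  match PySem.List.max? freqd.keys (fun k => freqd.getD k 0) with
  | some c => String.mk [c]
  | none => ""   -- unreached under Pre_: Python raises ValueError on the empty string

-- ===== PORT B =====
-- the for-loop body over sorted(string): state (prev, cnt, runs)
def fredAltStep (bones : String) (st : Option Char × Int × List (Char × Int)) (c : Char) :
    Option Char × Int × List (Char × Int) :=
  match st with
  | (prev, cnt, runs) =>
    if some c = prev then (prev, cnt + 1, runs)
    else
      match prev with
      | none => (some c, 1, runs)
      | some p => (some c, 1, runs ++ [(p, cnt + (if String.mk [p] = bones then 4 else 0))])

-- the runs list after the loop and the trailing 'if prev is not None' flush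
def fredAltRuns (string : String) (bones : String) : List (Char × Int) :=
  match (PySem.List.sorted string.toList (fun x => x) false).foldl (fredAltStep bones) (none, 0, []) with
  | (none, _, runs) => runs
  | (some p, cnt, runs) => runs ++ [(p, cnt + (if String.mk [p] = bones then 4 else 0))]

def fred_alt (string : String) (bones : String) : String :=
  let runs := fredAltRuns string bones
  match PySem.List.max? (runs.map Prod.snd) (fun x => x) with
  | none => ""   -- unreached under Pre_: Python raises ValueError on the empty string
  | some best =>
    -- min(string.index(c) for c, score in runs if score == best); every run char occurs
    -- in string, so string.index raises nowhere (index? is some; the getD 0 is unreached)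
    match PySem.List.min?
        ((runs.filter (fun r => r.2 == best)).map
          (fun r => (PySem.List.index? string.toList r.1).getD 0)) (fun x => x) with
    | none => ""
    | some i =>
      match PySem.List.pyGet? string.toList (i : Int) with
      | some ch => String.mk [ch]
      | none => ""

-- ===== PRECONDITION & SPEC =====
-- Pre_ excludes only the empty string, on which both A and B raise ValueError (max of empty sequence).
def Pre_fred (string : String) (bones : String) : Prop := string ≠ ""
instance (string : String) (bones : String) : Decidable (Pre_fred string bones) := by unfold Pre_fred; infer_instance
def pvWitness_fred : String × String := ("banana", "a")

def Spec_fred (string : String) (bones : String) (out : String) : Prop := out = fred_alt string bones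
instance (string : String) (bones : String) (out : String) : Decidable (Spec_fred string bones out) := by unfold Spec_fred; infer_instance

-- ===== CLAIM (what is proved, stated in full; the proofs are below) =====
def Claim_equal_fred : Prop := ∀ (string : String) (bones : String), Dom_fred string bones → Pre_fred string bones → Spec_fred string bones (fred string bones)

-- ===== LEMMAS AND PROOFS =====

-- the weighted score of a character: occurrences plus 4 iff it is the bones character
def fredScore (bones : String) (l : List Char) (c : Char) : Int :=
  (l.count c : Int) + (if String.mk [c] = bones then 4 else 0)

-- max? as a foldl with a strict-improvement update
def fredMaxStep (f : Char → Int) (acc : Option Char) (x : Char) : Option Char :=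
  match acc with
  | none => some x
  | some m => if f m < f x then some x else some m

theorem fred_max?_eq_foldl (f : Char → Int) (xs : List Char) :
    PySem.List.max? xs f = List.foldl (fredMaxStep f) none xs := by
  unfold PySem.List.max?
  congr 1
  funext acc x
  cases acc <;> rfl

theorem fred_foldl_congr (f g : Char → Int) (xs : List Char) :
    ∀ (acc : Option Char),
    (∀ x ∈ xs, f x = g x) → (∀ m, acc = some m → f m = g m) →
    List.foldl (fredMaxStep f) acc xs = List.foldl (fredMaxStep g) acc xs := by
  induction xs with
  | nil => intro acc _ _; rfl
  | cons a t ih =>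
    intro acc h hacc
    have ha : f a = g a := h a (List.mem_cons_self ..)
    have ht : ∀ x ∈ t, f x = g x := fun x hx => h x (List.mem_cons_of_mem _ hx)
    simp only [List.foldl_cons]
    cases acc with
    | none =>
      exact ih (some a) ht (fun m hm => by cases hm; exact ha)
    | some m =>
      have hm : f m = g m := hacc m rfl
      show List.foldl _ (if f m < f a then some a else some m) t =
        List.foldl _ (if g m < g a then some a else some m) t
      rw [ha, hm]
      apply ih _ ht
      intro m' hm'
      split at hm'
      · cases hm'; exact ha
      · cases hm'; exact hm

theorem fred_max?_congr (xs : List Char) (f g : Char → Int)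
    (h : ∀ x ∈ xs, f x = g x) : PySem.List.max? xs f = PySem.List.max? xs g := by
  rw [fred_max?_eq_foldl, fred_max?_eq_foldl]
  exact fred_foldl_congr f g xs none h (fun m hm => by cases hm)

-- max? returns the FIRST maximal element: everything before it is strictly smaller
theorem fred_max?_first_aux (f : Char → Int) (xs : List Char) :
    ∀ (m0 m : Char), List.foldl (fredMaxStep f) (some m0) xs = some m →
      (m = m0 ∧ ∀ y ∈ xs, f y ≤ f m0) ∨
      (∃ pre suf, xs = pre ++ m :: suf ∧ f m0 < f m ∧
        (∀ y ∈ pre, f y < f m) ∧ (∀ y ∈ suf, f y ≤ f m)) := by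
  induction xs with
  | nil => intro m0 m h; left; exact ⟨by simpa using h.symm, by simp⟩
  | cons x t ih =>
    intro m0 m h
    simp only [List.foldl_cons, fredMaxStep] at h
    by_cases hx : f m0 < f x
    · rw [if_pos hx] at h
      rcases ih x m h with ⟨rfl, hall⟩ | ⟨pre, suf, rfl, hlt, hpre, hsuf⟩
      · exact Or.inr ⟨[], t, rfl, hx, by simp, hall⟩
      · refine Or.inr ⟨x :: pre, suf, rfl, lt_trans hx hlt, ?_, hsuf⟩
        intro y hy
        rcases List.mem_cons.mp hy with rfl | hy
        · exact hlt
        · exact hpre y hy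
    · rw [if_neg hx] at h
      rcases ih m0 m h with ⟨rfl, hall⟩ | ⟨pre, suf, rfl, hlt, hpre, hsuf⟩
      · left
        refine ⟨rfl, ?_⟩
        intro y hy
        rcases List.mem_cons.mp hy with rfl | hy
        · exact le_of_not_gt hx
        · exact hall y hy
      · refine Or.inr ⟨x :: pre, suf, rfl, hlt, ?_, hsuf⟩
        intro y hy
        rcases List.mem_cons.mp hy with rfl | hy
        · exact lt_of_le_of_lt (le_of_not_gt hx) hlt
        · exact hpre y hy

theorem fred_max?_first (f : Char → Int) (xs : List Char) (m : Char)
    (h : PySem.List.max? xs f = some m) :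
    ∃ pre suf, xs = pre ++ m :: suf ∧ (∀ y ∈ pre, f y < f m) ∧ (∀ y ∈ suf, f y ≤ f m) := by
  rw [fred_max?_eq_foldl] at h
  cases xs with
  | nil => simp at h
  | cons x t =>
    have hx : List.foldl (fredMaxStep f) (some x) t = some m := h
    rcases fred_max?_first_aux f t x m hx with ⟨rfl, hall⟩ | ⟨pre, suf, rfl, hlt, hpre, hsuf⟩
    · exact ⟨[], t, rfl, by simp, hall⟩
    · refine ⟨x :: pre, suf, rfl, ?_, hsuf⟩
      intro y hy
      rcases List.mem_cons.mp hy with rfl | hy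
      · exact hlt
      · exact hpre y hy

-- dedup of an appended element
theorem fred_dedup_append (l : List Char) (a : Char) :
    PySem.List.dedup (l ++ [a]) =
      if a ∈ l then PySem.List.dedup l else PySem.List.dedup l ++ [a] := by
  simp only [PySem.List.dedup_eq_ofList, PySem.Set.ofList_eq_foldl, List.foldl_append,
    List.foldl_cons, List.foldl_nil]
  rw [← PySem.Set.ofList_eq_foldl]
  unfold PySem.Set.add
  by_cases hmem : a ∈ l
  · rw [if_pos hmem, if_pos]
    simp [PySem.Set.contains, PySem.Set.mem_ofList, hmem]
  · rw [if_neg hmem, if_neg]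
    simp [PySem.Set.contains, PySem.Set.mem_ofList, hmem]

-- invariant of A's dict-building loop
theorem fred_loop_inv (bones : String) (l : List Char) :
    (l.foldl (fredStep bones) PySem.Dict.empty).keys = PySem.List.dedup l ∧
    ∀ c, (l.foldl (fredStep bones) PySem.Dict.empty).getD c 0 =
      if c ∈ l then fredScore bones l c else 0 := by
  induction l using List.reverseRecOn with
  | nil =>
    constructor
    · simp [PySem.List.dedup, PySem.Set.ofList]
    · intro c; simp [PySem.Dict.getD_empty]
  | append_singleton l' a ih =>
    obtain ⟨hkeys, hvals⟩ := ih
    set d := l'.foldl (fredStep bones) PySem.Dict.empty with hd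
    have hfold : (l' ++ [a]).foldl (fredStep bones) PySem.Dict.empty = fredStep bones d a := by
      simp [List.foldl_append, hd]
    have hmemkeys : a ∈ d.keys ↔ a ∈ l' := by
      rw [hkeys, PySem.List.dedup_eq_ofList, PySem.Set.mem_ofList]
    have hdedup := fred_dedup_append l' a
    by_cases hmem : a ∈ l'
    · -- a already a key: modify branch
      have hcont : d.contains a = true := (PySem.Dict.contains_iff_mem_keys d a).2 (hmemkeys.2 hmem)
      constructor
      · rw [hfold, fredStep, if_pos hcont, PySem.Dict.keys_modify,
          PySem.Dict.keys_insert_of_contains _ _ hcont, hkeys, hdedup, if_pos hmem]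
      · intro c
        rw [hfold, fredStep, if_pos hcont, PySem.Dict.getD_modify]
        by_cases hca : c = a
        · subst hca
          rw [if_pos rfl, hvals, if_pos hmem, if_pos (by simp)]
          simp [fredScore, List.count_append]
          omega
        · rw [if_neg hca, hvals]
          have hc2 : c ∈ l' ++ [a] ↔ c ∈ l' := by simp [hca]
          by_cases hcl : c ∈ l'
          · rw [if_pos hcl, if_pos (hc2.2 hcl)]
            simp [fredScore, List.count_append, List.count_singleton, hca]
            intro h; exact absurd h.symm hca
          · rw [if_neg hcl, if_neg (fun h => hcl (hc2.1 h))]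
    · -- new key: insert branch
      have hcont : d.contains a = false := by
        cases hc : d.contains a with
        | false => rfl
        | true => exact absurd (hmemkeys.1 ((PySem.Dict.contains_iff_mem_keys d a).1 hc)) hmem
      constructor
      · rw [hfold, fredStep, if_neg (by simp [hcont]),
          PySem.Dict.keys_insert_of_not_contains _ _ hcont, hkeys, hdedup, if_neg hmem]
      · intro c
        rw [hfold, fredStep, if_neg (by simp [hcont]), PySem.Dict.getD_insert]
        by_cases hca : c = a
        · subst hca
          rw [if_pos rfl, if_pos (show c ∈ l' ++ [c] by simp)]
          have hcount : l'.count c = 0 := List.count_eq_zero.2 hmem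
          have h1 : (l' ++ [c]).count c = 1 := by
            rw [List.count_append, hcount]; simp
          unfold fredScore
          rw [h1]
          split_ifs <;> norm_num
        · rw [if_neg hca, hvals]
          have hc2 : c ∈ l' ++ [a] ↔ c ∈ l' := by simp [hca]
          by_cases hcl : c ∈ l'
          · rw [if_pos hcl, if_pos (hc2.2 hcl)]
            simp [fredScore, List.count_append, List.count_singleton]
            intro h; exact absurd h.symm hca
          · rw [if_neg hcl, if_neg (fun h => hcl (hc2.1 h))]

-- string.index, for characters that occur, is idxOf
theorem fred_idxOf?_of_mem (l : List Char) (c : Char) (h : c ∈ l) :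
    l.idxOf? c = some (l.idxOf c) := by
  induction l with
  | nil => simp at h
  | cons x t ih =>
    by_cases hx : x = c
    · subst hx; simp [List.idxOf?_cons]
    · have hm : c ∈ t := by
        cases List.mem_cons.mp h with
        | inl e => exact absurd e.symm hx
        | inr m => exact m
      simp [List.idxOf?_cons, hx, ih hm, beq_iff_eq]

theorem fred_index?_getD (l : List Char) (c : Char) (h : c ∈ l) :
    (PySem.List.index? l c).getD 0 = l.idxOf c := by
  rw [PySem.List.index?_eq_idxOf?, fred_idxOf?_of_mem l c h]
  rfl

-- the distinct characters, in first-occurrence order, have strictly increasing first indices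
theorem fred_dedup_pairwise_idxOf (l : List Char) :
    (PySem.List.dedup l).Pairwise (fun x y => l.idxOf x < l.idxOf y) := by
  induction l using List.reverseRecOn with
  | nil => simp [PySem.List.dedup, PySem.Set.ofList]
  | append_singleton l' a ih =>
    have hup : ∀ x ∈ PySem.List.dedup l', ∀ y ∈ PySem.List.dedup l',
        l'.idxOf x < l'.idxOf y → (l' ++ [a]).idxOf x < (l' ++ [a]).idxOf y := by
      intro x hx y hy hxy
      rw [List.idxOf_append_of_mem ((PySem.List.mem_dedup _ _).mp hx),
        List.idxOf_append_of_mem ((PySem.List.mem_dedup _ _).mp hy)]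
      exact hxy
    rw [fred_dedup_append]
    by_cases hmem : a ∈ l'
    · rw [if_pos hmem]
      exact ih.imp_of_mem (fun hx hy r => hup _ hx _ hy r)
    · rw [if_neg hmem]
      rw [List.pairwise_append]
      refine ⟨ih.imp_of_mem (fun hx hy r => hup _ hx _ hy r), by simp, ?_⟩
      intro x hx y hy
      rcases List.mem_singleton.mp hy with rfl
      have hxl : x ∈ l' := (PySem.List.mem_dedup _ _).mp hx
      rw [List.idxOf_append_of_mem hxl, List.idxOf_append_of_notMem hmem]
      have := List.idxOf_lt_length_of_mem hxl
      simp
      omega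

-- invariant of B's run-length loop over a sorted list
theorem fredAlt_fold_inv (bones : String) (s : List Char) (hs : s.Pairwise (· ≤ ·)) :
    (s = [] ∧ s.foldl (fredAltStep bones) (none, 0, []) = (none, 0, [])) ∨
    (∃ p t, PySem.List.dedup s = t ++ [p] ∧ (∀ x ∈ s, x ≤ p) ∧
      s.foldl (fredAltStep bones) (none, 0, []) =
        (some p, (s.count p : Int), t.map (fun c => (c, fredScore bones s c)))) := by
  induction s using List.reverseRecOn with
  | nil => exact Or.inl ⟨rfl, rfl⟩
  | append_singleton s a ih =>
    have hs' : s.Pairwise (· ≤ ·) := (List.pairwise_append.mp hs).1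
    have hle : ∀ x ∈ s, x ≤ a := fun x hx => (List.pairwise_append.mp hs).2.2 x hx a (by simp)
    rcases ih hs' with ⟨hnil, hf⟩ | ⟨p, t, hd, hp, hf⟩
    · subst hnil
      refine Or.inr ⟨a, [], ?_, ?_, ?_⟩
      · simp [PySem.List.dedup, PySem.Set.ofList, PySem.Set.add, PySem.Set.empty, PySem.Set.contains]
      · intro x hx; simp at hx; exact le_of_eq hx
      · simp [fredAltStep]
    · have hpmem : p ∈ s := (PySem.List.mem_dedup _ _).mp (by rw [hd]; simp)
      have hfold : (s ++ [a]).foldl (fredAltStep bones) (none, 0, []) =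
          fredAltStep bones (s.foldl (fredAltStep bones) (none, 0, [])) a := by
        simp [List.foldl_append]
      by_cases hmem : a ∈ s
      · have hap : a = p := le_antisymm (hp a hmem) (hle p hpmem)
        subst hap
        have hat : a ∉ t := by
          have hnd : (t ++ [a]).Nodup := by rw [← hd]; exact PySem.List.nodup_dedup _
          exact fun hin => (List.disjoint_of_nodup_append hnd) hin (by simp)
        refine Or.inr ⟨a, t, ?_, ?_, ?_⟩
        · rw [fred_dedup_append, if_pos hmem, hd]
        · intro x hx
          rcases List.mem_append.mp hx with h | h
          · exact hle x h
          · rcases List.mem_singleton.mp h with rfl; exact le_refl x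
        · rw [hfold, hf]
          show (if some a = some a then _ else _) = _
          rw [if_pos rfl]
          refine Prod.ext rfl (Prod.ext ?_ ?_)
          · show (s.count a : Int) + 1 = ((s ++ [a]).count a : Int)
            simp [List.count_append]
          · show t.map (fun c => (c, fredScore bones s c)) =
              t.map (fun c => (c, fredScore bones (s ++ [a]) c))
            apply List.map_congr_left
            intro x hx
            have hxa : x ≠ a := fun e => hat (e ▸ hx)
            simp [fredScore, List.count_append, List.count_singleton, Ne.symm hxa]
      · have hpa : ¬ (some a = some p) := by
          simp only [Option.some_inj]
          exact fun e => hmem (e ▸ hpmem)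
        refine Or.inr ⟨a, t ++ [p], ?_, ?_, ?_⟩
        · rw [fred_dedup_append, if_neg hmem, hd, List.append_assoc]
        · intro x hx
          rcases List.mem_append.mp hx with h | h
          · exact hle x h
          · rcases List.mem_singleton.mp h with rfl; exact le_refl x
        · rw [hfold, hf]
          show (if some a = some p then _ else _) = _
          rw [if_neg hpa]
          refine Prod.ext rfl (Prod.ext ?_ ?_)
          · show (1 : Int) = ((s ++ [a]).count a : Int)
            have : s.count a = 0 := List.count_eq_zero.2 hmem
            simp [List.count_append, this]
          · show t.map (fun c => (c, fredScore bones s c)) ++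
                [(p, (s.count p : Int) + (if String.mk [p] = bones then 4 else 0))] =
              (t ++ [p]).map (fun c => (c, fredScore bones (s ++ [a]) c))
            rw [List.map_append]
            congr 1
            · apply List.map_congr_left
              intro x hx
              have hxs : x ∈ s := (PySem.List.mem_dedup _ _).mp (by rw [hd]; exact List.mem_append_left _ hx)
              have hxa : x ≠ a := fun e => hmem (e ▸ hxs)
              simp [fredScore, List.count_append, List.count_singleton, Ne.symm hxa]
            · have hpa' : p ≠ a := fun e => hmem (e ▸ hpmem)
              simp [fredScore, List.count_append, List.count_singleton, Ne.symm hpa']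

-- the runs list is exactly the scored distinct characters of the sorted string
theorem fredAltRuns_eq (string bones : String) :
    fredAltRuns string bones =
      (PySem.List.dedup (PySem.List.sorted string.toList (fun x => x) false)).map
        (fun c => (c, fredScore bones string.toList c)) := by
  unfold fredAltRuns
  set s := PySem.List.sorted string.toList (fun x => x) false with hsdef
  have hperm : s.Perm string.toList := PySem.List.sorted_perm ..
  have hfun : (fun c => (c, fredScore bones s c)) =
      (fun c => (c, fredScore bones string.toList c)) := by
    funext c; simp [fredScore, hperm.count_eq]
  have hpw : s.Pairwise (· ≤ ·) := by
    have := PySem.List.sorted_pairwise (xs := string.toList) (key := fun x => x)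
    simpa using this
  rcases fredAlt_fold_inv bones s hpw with ⟨hnil, hf⟩ | ⟨p, t, hd, _, hf⟩
  · rw [hf, hnil]
    simp [PySem.List.dedup, PySem.Set.ofList]
  · rw [hf, hd, List.map_append]
    show t.map (fun c => (c, fredScore bones s c)) ++
        [(p, (s.count p : Int) + (if String.mk [p] = bones then 4 else 0))] = _
    rw [hfun]
    congr 1
    show [(p, (s.count p : Int) + _)] = [(p, fredScore bones string.toList p)]
    simp [fredScore, hperm.count_eq]

-- ===== VERDICT (by name: the statement is the Claim_ definition above) =====
theorem fred_spec : Claim_equal_fred := by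
  intro string bones _ hpre
  unfold Spec_fred
  have hl : string.toList ≠ [] := by simpa [String.toList_eq_nil_iff] using hpre
  -- A's side: max over the distinct characters in first-occurrence order, scored by fredScore
  obtain ⟨hkeys, hvals⟩ := fred_loop_inv bones string.toList
  have hcong : PySem.List.max?
      (string.toList.foldl (fredStep bones) PySem.Dict.empty).keys
      (fun k => (string.toList.foldl (fredStep bones) PySem.Dict.empty).getD k 0) =
      PySem.List.max? (PySem.List.dedup string.toList) (fredScore bones string.toList) := by
    rw [hkeys]
    apply fred_max?_congr
    intro x hx
    have hxl : x ∈ string.toList := (PySem.List.mem_dedup _ _).mp hx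
    rw [hvals x, if_pos hxl]
  have hEne : PySem.List.dedup string.toList ≠ [] := by
    obtain ⟨c, hc⟩ := List.exists_mem_of_ne_nil _ hl
    exact List.ne_nil_of_mem ((PySem.List.mem_dedup _ _).mpr hc)
  obtain ⟨a, hmax⟩ : ∃ a, PySem.List.max? (PySem.List.dedup string.toList)
      (fredScore bones string.toList) = some a := by
    cases hm : PySem.List.max? (PySem.List.dedup string.toList) (fredScore bones string.toList) with
    | none => exact absurd ((PySem.List.max?_eq_none_iff ..).mp hm) hEne
    | some a => exact ⟨a, rfl⟩
  have hA : fred string bones = String.mk [a] := by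
    show (match PySem.List.max?
        (string.toList.foldl (fredStep bones) PySem.Dict.empty).keys
        (fun k => (string.toList.foldl (fredStep bones) PySem.Dict.empty).getD k 0) with
      | some c => String.mk [c]
      | none => "") = String.mk [a]
    rw [hcong, hmax]
  have haE : a ∈ PySem.List.dedup string.toList := PySem.List.max?_mem hmax
  have hal : a ∈ string.toList := (PySem.List.mem_dedup _ _).mp haE
  have hamax : ∀ y ∈ PySem.List.dedup string.toList,
      fredScore bones string.toList y ≤ fredScore bones string.toList a :=
    PySem.List.max?_isMax hmax
  obtain ⟨pre, suf, hEd, hpre', _⟩ :=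
    fred_max?_first (fredScore bones string.toList) (PySem.List.dedup string.toList) a hmax
  -- B's side
  have hruns := fredAltRuns_eq string bones
  have hDE : ∀ c, c ∈ PySem.List.dedup (PySem.List.sorted string.toList (fun x => x) false) ↔
      c ∈ PySem.List.dedup string.toList := by
    intro c
    rw [PySem.List.mem_dedup, PySem.List.mem_dedup, PySem.List.mem_sorted]
  have haD : a ∈ PySem.List.dedup (PySem.List.sorted string.toList (fun x => x) false) :=
    (hDE a).mpr haE
  have hsnd : ((PySem.List.dedup (PySem.List.sorted string.toList (fun x => x) false)).map
        (fun c => (c, fredScore bones string.toList c))).map Prod.snd =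
      (PySem.List.dedup (PySem.List.sorted string.toList (fun x => x) false)).map
        (fredScore bones string.toList) := by
    rw [List.map_map]; rfl
  have hfaD : fredScore bones string.toList a ∈
      (PySem.List.dedup (PySem.List.sorted string.toList (fun x => x) false)).map
        (fredScore bones string.toList) :=
    List.mem_map_of_mem haD
  obtain ⟨best, hbest⟩ : ∃ b, PySem.List.max?
      ((PySem.List.dedup (PySem.List.sorted string.toList (fun x => x) false)).map
        (fredScore bones string.toList)) (fun x => x) = some b := by
    cases hm : PySem.List.max?
        ((PySem.List.dedup (PySem.List.sorted string.toList (fun x => x) false)).map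
          (fredScore bones string.toList)) (fun x => x) with
    | none =>
      have := (PySem.List.max?_eq_none_iff ..).mp hm
      rw [this] at hfaD
      exact absurd hfaD (List.not_mem_nil)
    | some b => exact ⟨b, rfl⟩
  have hbesteq : best = fredScore bones string.toList a := by
    have h1 : best ≤ fredScore bones string.toList a := by
      obtain ⟨c0, hc0D, hc0e⟩ := List.mem_map.mp (PySem.List.max?_mem hbest)
      rw [← hc0e]
      exact hamax c0 ((hDE c0).mp hc0D)
    have h2 : fredScore bones string.toList a ≤ best := PySem.List.max?_isMax hbest _ hfaD
    omega
  have hfilter : (((PySem.List.dedup (PySem.List.sorted string.toList (fun x => x) false)).map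
          (fun c => (c, fredScore bones string.toList c))).filter
          (fun r => r.2 == best)).map
        (fun r => (PySem.List.index? string.toList r.1).getD 0) =
      ((PySem.List.dedup (PySem.List.sorted string.toList (fun x => x) false)).filter
          (fun c => fredScore bones string.toList c == best)).map
        (fun c => (PySem.List.index? string.toList c).getD 0) := by
    rw [List.filter_map, List.map_map]; rfl
  have haF : a ∈ (PySem.List.dedup (PySem.List.sorted string.toList (fun x => x) false)).filter
      (fun c => fredScore bones string.toList c == best) :=
    List.mem_filter.mpr ⟨haD, by rw [hbesteq]; exact beq_self_eq_true _⟩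
  have haS : (PySem.List.index? string.toList a).getD 0 ∈
      ((PySem.List.dedup (PySem.List.sorted string.toList (fun x => x) false)).filter
          (fun c => fredScore bones string.toList c == best)).map
        (fun c => (PySem.List.index? string.toList c).getD 0) :=
    List.mem_map_of_mem haF
  obtain ⟨i, hmin⟩ : ∃ i, PySem.List.min?
      (((PySem.List.dedup (PySem.List.sorted string.toList (fun x => x) false)).filter
          (fun c => fredScore bones string.toList c == best)).map
        (fun c => (PySem.List.index? string.toList c).getD 0)) (fun x => x) = some i := by
    cases hm : PySem.List.min?
        (((PySem.List.dedup (PySem.List.sorted string.toList (fun x => x) false)).filter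
            (fun c => fredScore bones string.toList c == best)).map
          (fun c => (PySem.List.index? string.toList c).getD 0)) (fun x => x) with
    | none =>
      have := (PySem.List.min?_eq_none_iff ..).mp hm
      rw [this] at haS
      exact absurd haS (List.not_mem_nil)
    | some i => exact ⟨i, rfl⟩
  -- the minimum index is a's first-occurrence index
  have hidxa : (PySem.List.index? string.toList a).getD 0 = string.toList.idxOf a :=
    fred_index?_getD string.toList a hal
  have hile : i ≤ string.toList.idxOf a := by
    have := PySem.List.min?_isMin hmin _ haS
    rwa [hidxa] at this
  have hige : string.toList.idxOf a ≤ i := by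
    obtain ⟨c1, hc1F, hc1e⟩ := List.mem_map.mp (PySem.List.min?_mem hmin)
    obtain ⟨hc1D, hc1b⟩ := List.mem_filter.mp hc1F
    have hc1best : fredScore bones string.toList c1 = fredScore bones string.toList a := by
      rw [beq_iff_eq.mp hc1b, hbesteq]
    have hc1E : c1 ∈ PySem.List.dedup string.toList := (hDE c1).mp hc1D
    have hc1l : c1 ∈ string.toList := (PySem.List.mem_dedup _ _).mp hc1E
    rw [← hc1e, fred_index?_getD string.toList c1 hc1l]
    rw [hEd] at hc1E
    rcases List.mem_append.mp hc1E with hcp | hcs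
    · exact absurd hc1best (ne_of_lt (hpre' c1 hcp))
    · rcases List.mem_cons.mp hcs with rfl | hcsuf
      · exact le_refl _
      · have hpw := fred_dedup_pairwise_idxOf string.toList
        rw [hEd] at hpw
        have hcross := (List.pairwise_cons.mp (List.pairwise_append.mp hpw).2.1).1
        exact le_of_lt (hcross c1 hcsuf)
  have hia : i = string.toList.idxOf a := le_antisymm hile hige
  have hlt : string.toList.idxOf a < string.toList.length := List.idxOf_lt_length_of_mem hal
  have hget : PySem.List.pyGet? string.toList ((i : Nat) : Int) = some a := by
    rw [hia, PySem.List.pyGet?_natCast, List.getElem?_eq_getElem hlt, List.getElem_idxOf hlt]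
  have hB : fred_alt string bones = String.mk [a] := by
    show (match PySem.List.max? ((fredAltRuns string bones).map Prod.snd) (fun x => x) with
      | none => ""
      | some best =>
        match PySem.List.min?
            (((fredAltRuns string bones).filter (fun r => r.2 == best)).map
              (fun r => (PySem.List.index? string.toList r.1).getD 0)) (fun x => x) with
        | none => ""
        | some i =>
          match PySem.List.pyGet? string.toList (i : Int) with
          | some ch => String.mk [ch]
          | none => "") = String.mk [a]
    rw [hruns, hsnd, hbest]
    show (match PySem.List.min?
        ((((PySem.List.dedup (PySem.List.sorted string.toList (fun x => x) false)).map
            (fun c => (c, fredScore bones string.toList c))).filter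
            (fun r => r.2 == best)).map
          (fun r => (PySem.List.index? string.toList r.1).getD 0)) (fun x => x) with
      | none => ""
      | some i =>
        match PySem.List.pyGet? string.toList (i : Int) with
        | some ch => String.mk [ch]
        | none => "") = String.mk [a]
    rw [hfilter, hmin]
    show (match PySem.List.pyGet? string.toList (i : Int) with
      | some ch => String.mk [ch]
      | none => "") = String.mk [a]
    rw [hget]
  rw [hA, hB]
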